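-- pv_equiv track=rewrite | github.com/Incantus/incantus | 2D-pygame/data/cards/parse_oracle.py | convert_cost
-- ===== SOURCE A (Python) =====
-- def convert_cost(cost):
--     #return cost
--     cost_array = dict(zip(['R', 'G', 'B', 'W', 'U', 'C'], [0]*6))
--     for c in cost:
--         if c not in ['R', 'G', 'B', 'W', 'U']:
--             #colorless
--             if c == "X": c = "-1"
--             cost_array['C'] += int(c)
--         else:
--             cost_array[c] += 1
--     return cost_array
-- ===== SOURCE B (Python) =====
-- def convert_cost(cost):
--     # divide and conquer: a single symbol converts directly; a longer cost is
--     # split in half, converted recursively, and the two counters merged.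
--     def merge(d1, d2):
--         return {k: d1[k] + d2[k] for k in d1}
--
--     def conv(s):
--         d = {'R': 0, 'G': 0, 'B': 0, 'W': 0, 'U': 0, 'C': 0}
--         if len(s) == 0:
--             return d
--         if len(s) == 1:
--             if s in ('R', 'G', 'B', 'W', 'U'):
--                 d[s] = 1
--             else:
--                 d['C'] = -1 if s == 'X' else int(s)
--             return d
--         mid = len(s) // 2
--         return merge(conv(s[:mid]), conv(s[mid:]))
--
--     return conv(cost)
-- ===== Notes on version B (the rewrite author's own statement) =====
-- stated objective: alternative
-- what changed: Replaces A's single left-to-right branch-accumulate loop over a mutable dict with a divide-and-conquer recursion: single symbols convert directly and longer costs are split in half, converted recursively, and merged by pointwise addition of the six counters.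
-- outside the precondition, e.g. on convert_cost('C'): A raises ValueError, B raises ValueError
import Mathlib
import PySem

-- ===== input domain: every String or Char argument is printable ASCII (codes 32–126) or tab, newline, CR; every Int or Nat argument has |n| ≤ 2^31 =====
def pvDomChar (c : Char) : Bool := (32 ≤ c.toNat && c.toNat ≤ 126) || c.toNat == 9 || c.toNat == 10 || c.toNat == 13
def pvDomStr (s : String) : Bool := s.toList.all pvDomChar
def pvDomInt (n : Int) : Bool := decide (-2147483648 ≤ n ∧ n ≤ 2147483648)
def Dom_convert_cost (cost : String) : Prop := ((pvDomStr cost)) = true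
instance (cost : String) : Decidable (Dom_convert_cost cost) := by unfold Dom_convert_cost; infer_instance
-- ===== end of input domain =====

-- B replaces A's single left-to-right branch-accumulate loop with a divide-and-conquer
-- recursion (split in half, convert each half, merge the six counters pointwise);
-- objective: alternative algorithm, no speed claim.

-- ===== PORT A =====
-- the loop of A: Option threads int()'s ValueError (none = the exception, excluded by Pre_)
def convertLoopA : List Char → PySem.Dict String Int → Option (PySem.Dict String Int)
  | [], d => some d
  | c :: rest, d =>
    if ¬ (c ∈ ['R', 'G', 'B', 'W', 'U']) then
      -- if c == "X": c = "-1";  cost_array['C'] += int(c)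
      match PySem.Int.ofChars? (if c = 'X' then ['-', '1'] else [c]) with
      | none => none
      | some v => convertLoopA rest (d.modify "C" 0 (· + v))
    else
      convertLoopA rest (d.modify (String.ofList [c]) 0 (· + 1))

def convert_cost (cost : String) : List (String × Int) :=
  let init : PySem.Dict String Int :=
    PySem.Dict.ofList (List.zip ["R", "G", "B", "W", "U", "C"] [0, 0, 0, 0, 0, 0])
  match convertLoopA cost.toList init with
  | some d => d.items
  | none => []   -- unreachable under Pre_ (int(c) raised)

-- ===== PORT B =====
def pvZeroDict : PySem.Dict String Int :=
  PySem.Dict.ofList [("R", 0), ("G", 0), ("B", 0), ("W", 0), ("U", 0), ("C", 0)]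

-- merge(d1, d2) = {k: d1[k] + d2[k] for k in d1}; d2[k] never misses in B's own use
-- (both operands always carry the same six keys), so getD 0 is exact here
def pvMerge (d1 d2 : PySem.Dict String Int) : PySem.Dict String Int :=
  PySem.Dict.ofList (d1.items.map (fun kv => (kv.1, kv.2 + d2.getD kv.1 0)))

-- conv(s): Option threads int()'s ValueError.  s[:mid] / s[mid:] are ported as
-- take/drop, exact since 0 ≤ mid ≤ len(s).
def pvConv : List Char → Option (PySem.Dict String Int)
  | [] => some pvZeroDict
  | [c] =>
    if c ∈ ['R', 'G', 'B', 'W', 'U'] then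
      some (pvZeroDict.insert (String.ofList [c]) 1)
    else
      match (if c = 'X' then some (-1 : Int) else PySem.Int.ofChars? [c]) with
      | none => none
      | some v => some (pvZeroDict.insert "C" v)
  | c1 :: c2 :: rest =>
    let s := c1 :: c2 :: rest
    let mid := s.length / 2
    -- the two recursive calls; Option.bind/map thread a ValueError from either half
    (pvConv (s.take mid)).bind fun d1 => (pvConv (s.drop mid)).map fun d2 => pvMerge d1 d2
termination_by s => s.length
decreasing_by
  · simp; omega
  · simp; omega

def convert_cost_alt (cost : String) : List (String × Int) :=
  match pvConv cost.toList with
  | some d => d.items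
  | none => []   -- unreachable under Pre_ (int(s) raised)

-- ===== PRECONDITION & SPEC =====
-- Pre_ excludes exactly the inputs where A's int(c) raises ValueError: any character that is
-- not a mana symbol R/G/B/W/U, X, or a decimal digit.
def Pre_convert_cost (cost : String) : Prop :=
  (cost.toList.all (fun c => c ∈ ['R', 'G', 'B', 'W', 'U', 'X',
                                  '0', '1', '2', '3', '4', '5', '6', '7', '8', '9'])) = true
instance (cost : String) : Decidable (Pre_convert_cost cost) := by
  unfold Pre_convert_cost; infer_instance

def pvWitness_convert_cost : String := "XRR2U"

def Spec_convert_cost (cost : String) (out : List (String × Int)) : Prop := out = convert_cost_alt cost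
instance (cost : String) (out : List (String × Int)) : Decidable (Spec_convert_cost cost out) := by unfold Spec_convert_cost; infer_instance

-- ===== CLAIM (what is proved, stated in full; the proofs are below) =====
def Claim_equal_convert_cost : Prop := ∀ (cost : String), Dom_convert_cost cost → Pre_convert_cost cost → Spec_convert_cost cost (convert_cost cost)

-- ===== LEMMAS AND PROOFS =====

def pvValidChar (c : Char) : Prop :=
  c ∈ ['R', 'G', 'B', 'W', 'U', 'X', '0', '1', '2', '3', '4', '5', '6', '7', '8', '9']

-- colorless value of one non-colored character (its int() value, X ↦ -1)
def pvCVal (c : Char) : Int :=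
  if c = 'X' then -1 else (PySem.Int.ofChars? [c]).getD 0

-- colorless total of a character list
def pvColorless (l : List Char) : Int :=
  ((l.filter (fun ch => ¬ (ch ∈ ['R', 'G', 'B', 'W', 'U']))).map pvCVal).sum

-- the common characterisation both ports are proved equal to
def pvCounts (l : List Char) : PySem.Dict String Int :=
  PySem.Dict.mk
    [("R", l.count 'R'), ("G", l.count 'G'), ("B", l.count 'B'),
     ("W", l.count 'W'), ("U", l.count 'U'), ("C", pvColorless l)]

theorem pvColorless_append (l1 l2 : List Char) :
    pvColorless (l1 ++ l2) = pvColorless l1 + pvColorless l2 := by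
  simp [pvColorless]

-- merging the characterisations of two pieces gives the characterisation of the whole
theorem pvMerge_counts (l1 l2 : List Char) :
    pvMerge (pvCounts l1) (pvCounts l2) = pvCounts (l1 ++ l2) := by
  simp [pvMerge, pvCounts, PySem.Dict.ofList, PySem.Dict.update, PySem.Dict.getD,
    PySem.Dict.get?, PySem.Dict.insert, PySem.Dict.contains, PySem.Dict.empty,
    List.count_append, pvColorless_append]

-- the int() value of each admitted non-colored character, as one decidable fact
theorem pvOfChars_valid : ∀ c ∈ ['X', '0', '1', '2', '3', '4', '5', '6', '7', '8', '9'],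
    PySem.Int.ofChars? (if c = 'X' then ['-', '1'] else [c]) = some (pvCVal c) := by
  intro c hc
  fin_cases hc <;> decide

-- loop invariant for A: starting from an arbitrary six-entry dict in A's fixed key order,
-- the loop adds the per-color counts and the colorless total
theorem convertLoopA_invariant (l : List Char) (hl : ∀ c ∈ l, pvValidChar c)
    (r g b w u cc : Int) :
    convertLoopA l (PySem.Dict.mk [("R", r), ("G", g), ("B", b), ("W", w), ("U", u), ("C", cc)]) =
      some (PySem.Dict.mk
        [("R", r + l.count 'R'), ("G", g + l.count 'G'), ("B", b + l.count 'B'),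
         ("W", w + l.count 'W'), ("U", u + l.count 'U'), ("C", cc + pvColorless l)]) := by
  induction l generalizing r g b w u cc with
  | nil => simp [convertLoopA, pvColorless]
  | cons c rest ih =>
    have hc := hl c (List.mem_cons_self ..)
    have hrest : ∀ x ∈ rest, pvValidChar x := fun x hx => hl x (List.mem_cons_of_mem _ hx)
    by_cases hc5 : c ∈ ['R', 'G', 'B', 'W', 'U']
    · simp only [List.mem_cons, List.not_mem_nil, or_false] at hc5
      rcases hc5 with rfl|rfl|rfl|rfl|rfl <;>
        simp [convertLoopA, PySem.Dict.modify, PySem.Dict.getD, PySem.Dict.get?,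
          PySem.Dict.insert, PySem.Dict.contains,
          show String.ofList ['R'] = "R" from rfl, show String.ofList ['G'] = "G" from rfl,
          show String.ofList ['B'] = "B" from rfl, show String.ofList ['W'] = "W" from rfl,
          show String.ofList ['U'] = "U" from rfl,
          ih hrest, pvColorless] <;> ring_nf
    · have hmem : c ∈ ['X', '0', '1', '2', '3', '4', '5', '6', '7', '8', '9'] := by
        simp only [pvValidChar, List.mem_cons, List.not_mem_nil, or_false] at hc hc5 ⊢
        tauto
      have hval := pvOfChars_valid c hmem
      have hR : ('R' : Char) ≠ c := fun h => hc5 (h ▸ by decide)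
      have hG : ('G' : Char) ≠ c := fun h => hc5 (h ▸ by decide)
      have hB : ('B' : Char) ≠ c := fun h => hc5 (h ▸ by decide)
      have hW : ('W' : Char) ≠ c := fun h => hc5 (h ▸ by decide)
      have hU : ('U' : Char) ≠ c := fun h => hc5 (h ▸ by decide)
      simp [convertLoopA, hc5, hval, PySem.Dict.modify, PySem.Dict.getD, PySem.Dict.get?,
        PySem.Dict.insert, PySem.Dict.contains, ih hrest, pvColorless,
        List.count_cons, hR, hG, hB, hW, hU,
        hR.symm, hG.symm, hB.symm, hW.symm, hU.symm]
      ring_nf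

-- B's recursion computes the same characterisation (strong induction on the length)
theorem pvConv_eq_counts_aux (n : Nat) : ∀ (l : List Char), l.length ≤ n →
    (∀ c ∈ l, pvValidChar c) → pvConv l = some (pvCounts l) := by
  induction n with
  | zero =>
    intro l hlen _
    have : l = [] := by cases l <;> simp_all
    subst this
    simp [pvConv, pvZeroDict, pvCounts, pvColorless, PySem.Dict.ofList,
      PySem.Dict.update, PySem.Dict.insert, PySem.Dict.contains, PySem.Dict.empty]
  | succ n ih =>
    intro l hlen hval
    match l with
    | [] =>
      simp [pvConv, pvZeroDict, pvCounts, pvColorless, PySem.Dict.ofList,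
        PySem.Dict.update, PySem.Dict.insert, PySem.Dict.contains, PySem.Dict.empty]
    | [c] =>
      have hc := hval c (List.mem_cons_self ..)
      simp only [pvValidChar, List.mem_cons, List.not_mem_nil, or_false] at hc
      rw [pvConv]
      rcases hc with rfl|rfl|rfl|rfl|rfl|rfl|rfl|rfl|rfl|rfl|rfl|rfl|rfl|rfl|rfl|rfl <;> decide
    | c1 :: c2 :: rest =>
      have h1 := ih ((c1 :: c2 :: rest).take ((c1 :: c2 :: rest).length / 2))
        (by simp only [List.length_cons] at hlen; simp; omega)
        (fun c hc => hval c (List.mem_of_mem_take hc))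
      have h2 := ih ((c1 :: c2 :: rest).drop ((c1 :: c2 :: rest).length / 2))
        (by simp only [List.length_cons] at hlen; simp; omega)
        (fun c hc => hval c (List.mem_of_mem_drop hc))
      rw [pvConv]
      simp only [h1, h2, Option.bind_some, Option.map_some]
      rw [pvMerge_counts, List.take_append_drop]

theorem pvConv_eq_counts (l : List Char) (hl : ∀ c ∈ l, pvValidChar c) :
    pvConv l = some (pvCounts l) :=
  pvConv_eq_counts_aux l.length l le_rfl hl

-- ===== VERDICT (by name: the statement is the Claim_ definition above) =====
theorem convert_cost_spec : Claim_equal_convert_cost := by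
  intro cost _ hpre
  have hpre' : ∀ c ∈ cost.toList, pvValidChar c :=
    fun c hc => by simpa [pvValidChar] using List.all_eq_true.mp hpre c hc
  unfold Spec_convert_cost convert_cost convert_cost_alt
  show (match convertLoopA cost.toList (PySem.Dict.ofList (List.zip ["R", "G", "B", "W", "U", "C"] [0, 0, 0, 0, 0, 0])) with
        | some d => d.items
        | none => []) = _
  rw [show (PySem.Dict.ofList (List.zip ["R", "G", "B", "W", "U", "C"] [0, 0, 0, 0, 0, 0]) : PySem.Dict String Int)
      = PySem.Dict.mk [("R", 0), ("G", 0), ("B", 0), ("W", 0), ("U", 0), ("C", 0)] from by decide,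
     convertLoopA_invariant cost.toList hpre' 0 0 0 0 0 0,
     pvConv_eq_counts cost.toList hpre']
  simp [pvCounts]
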